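-- pv_equiv track=rewrite | github.com/vivekn/code-jam | file_fix.py | add_path
-- ===== SOURCE A (Python) =====
-- def add_path(filesystem, path):
--     path = path.strip('/').split('/')
--     ctr = 0
--     for i in range(len(path)):
--         new_path = '/'+'/'.join(path[:i+1])
--         if new_path not in filesystem:
--             ctr += 1
--             filesystem.add(new_path)
--     return ctr
-- ===== SOURCE B (Python) =====
-- def add_path(filesystem, path):
--     ctr = 0
--     cur = ''
--     for part in path.strip('/').split('/'):
--         cur = cur + '/' + part
--         if cur not in filesystem:
--             ctr += 1
--             filesystem.add(cur)
--     return ctr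
-- ===== Notes on version B (the rewrite author's own statement) =====
-- stated objective: alternative
-- what changed: B builds each prefix path incrementally with a running accumulator string in a single pass over the components, instead of slicing and re-joining the whole prefix list on every loop iteration.
import Mathlib
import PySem

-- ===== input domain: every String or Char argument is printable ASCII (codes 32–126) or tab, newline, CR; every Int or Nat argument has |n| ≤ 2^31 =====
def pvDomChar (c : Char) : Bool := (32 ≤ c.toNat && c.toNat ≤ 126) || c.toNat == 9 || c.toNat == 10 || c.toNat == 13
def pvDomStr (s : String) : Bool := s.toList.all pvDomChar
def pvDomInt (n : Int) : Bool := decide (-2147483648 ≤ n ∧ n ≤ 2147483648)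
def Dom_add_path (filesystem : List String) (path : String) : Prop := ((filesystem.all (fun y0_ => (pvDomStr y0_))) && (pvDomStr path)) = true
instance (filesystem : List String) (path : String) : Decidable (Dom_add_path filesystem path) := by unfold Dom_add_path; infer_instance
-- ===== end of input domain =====

-- B builds each prefix path incrementally with a running accumulator instead of re-joining
-- the whole prefix on every iteration (objective: alternative/simpler single pass).
-- Note: the Python A mutates its `filesystem` set argument (adds the new prefixes); B performs
-- the SAME mutation; the equivalence proved here is about the RETURN value.
-- Both ports work on `List Char` via the PySem.Chars primitives (String.toList is injective,
-- so set membership of the char lists is exactly string membership).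

-- ===== PORT A =====
def addPathStepA (parts : List (List Char)) (st : Int × PySem.Set (List Char)) (i : Int) :
    Int × PySem.Set (List Char) :=
  let np := '/' :: PySem.Chars.join ['/'] (PySem.List.slice parts none (some (i + 1)))
  if PySem.Set.contains st.2 np then st else (st.1 + 1, PySem.Set.add st.2 np)

def add_path (filesystem : List String) (path : String) : Int :=
  let parts := PySem.Chars.splitOn (PySem.Chars.stripChars path.toList ['/']) ['/']
  ((PySem.List.pyRange 0 (parts.length : Int) 1).foldl (addPathStepA parts)
    (0, filesystem.map String.toList)).1

-- ===== PORT B =====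
def addPathStepB (s : Int × PySem.Set (List Char) × List Char) (part : List Char) :
    Int × PySem.Set (List Char) × List Char :=
  let cur := s.2.2 ++ '/' :: part
  if PySem.Set.contains s.2.1 cur then (s.1, s.2.1, cur)
  else (s.1 + 1, PySem.Set.add s.2.1 cur, cur)

def add_path_alt (filesystem : List String) (path : String) : Int :=
  ((PySem.Chars.splitOn (PySem.Chars.stripChars path.toList ['/']) ['/']).foldl
    addPathStepB (0, filesystem.map String.toList, [])).1

-- ===== PRECONDITION & SPEC =====
def Spec_add_path (filesystem : List String) (path : String) (out : Int) : Prop := out = add_path_alt filesystem path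
instance (filesystem : List String) (path : String) (out : Int) : Decidable (Spec_add_path filesystem path out) := by unfold Spec_add_path; infer_instance

-- ===== CLAIM (what is proved, stated in full; the proofs are below) =====
def Claim_equal_add_path : Prop := ∀ (filesystem : List String) (path : String), Dom_add_path filesystem path → Spec_add_path filesystem path (add_path filesystem path)

-- ===== LEMMAS AND PROOFS =====

-- A's loop body with the slice already resolved to a take of the first n parts.
def stepT (parts : List (List Char)) (st : Int × PySem.Set (List Char)) (n : Nat) :
    Int × PySem.Set (List Char) :=
  let np := '/' :: PySem.Chars.join ['/'] (parts.take n)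
  if PySem.Set.contains st.2 np then st else (st.1 + 1, PySem.Set.add st.2 np)

lemma stepA_eq (parts : List (List Char)) (st : Int × PySem.Set (List Char)) (k : Nat) :
    addPathStepA parts st (0 + (k : Int)) = stepT parts st (k + 1) := by
  have h0 : (0 : Int) ≤ 0 + (k : Int) + 1 := by omega
  have ht : ((0 : Int) + (k : Int) + 1).toNat = k + 1 := by omega
  simp only [addPathStepA, stepT]
  rw [PySem.List.slice_to _ h0, ht]

-- B's running accumulator after consuming `pre`.
def reprC (pre : List (List Char)) : List Char :=
  pre.foldl (fun a p => a ++ '/' :: p) []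

lemma aux_join : ∀ (l : List (List Char)) (a : List Char), l ≠ [] →
    a ++ '/' :: PySem.Chars.join ['/'] l = l.foldl (fun a x => a ++ '/' :: x) a := by
  intro l
  induction l with
  | nil => intro a h; exact absurd rfl h
  | cons x t ih =>
    intro a _
    cases t with
    | nil => simp [PySem.Chars.join_singleton]
    | cons y t' =>
      rw [PySem.Chars.join_cons_cons]
      have := ih (a ++ '/' :: x) (by simp)
      simp only [List.foldl_cons] at this ⊢
      rw [← this]
      simp

lemma reprC_append (pre : List (List Char)) (p : List Char) :
    reprC (pre ++ [p]) = reprC pre ++ '/' :: p := by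
  simp [reprC, List.foldl_append]

lemma prefix_join (pre : List (List Char)) (p : List Char) :
    '/' :: PySem.Chars.join ['/'] (pre ++ [p]) = reprC pre ++ '/' :: p := by
  have h := aux_join (pre ++ [p]) [] (by simp)
  simpa [reprC_append, reprC] using h

lemma take_len_succ (pre : List (List Char)) (p : List Char) (rs : List (List Char)) :
    (pre ++ p :: rs).take (pre.length + 1) = pre ++ [p] := by
  rw [List.take_append]
  simp

lemma loop_eq : ∀ (rest pre : List (List Char)) (st : Int × PySem.Set (List Char)),
    (List.range rest.length).foldl
        (fun st k => stepT (pre ++ rest) st (pre.length + k + 1)) st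
      = ((rest.foldl addPathStepB (st.1, st.2, reprC pre)).1,
         (rest.foldl addPathStepB (st.1, st.2, reprC pre)).2.1) := by
  intro rest
  induction rest with
  | nil => intro pre st; rfl
  | cons p rs ih =>
    intro pre st
    rw [List.length_cons, List.range_succ_eq_map, List.foldl_cons, List.foldl_map]
    have hnp : ('/' :: PySem.Chars.join ['/'] ((pre ++ p :: rs).take (pre.length + 0 + 1)))
        = reprC pre ++ '/' :: p := by
      rw [Nat.add_zero, take_len_succ, prefix_join]
    set st' := stepT (pre ++ p :: rs) st (pre.length + 0 + 1) with hst'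
    have hB : addPathStepB (st.1, st.2, reprC pre) p = (st'.1, st'.2, reprC (pre ++ [p])) := by
      rw [hst']
      simp only [stepT, addPathStepB, hnp, reprC_append]
      split <;> rfl
    have hfun : (fun (st : Int × PySem.Set (List Char)) (k : Nat) =>
          stepT (pre ++ p :: rs) st (pre.length + (k + 1) + 1))
        = (fun st k => stepT ((pre ++ [p]) ++ rs) st ((pre ++ [p]).length + k + 1)) := by
      funext st k
      rw [List.append_assoc]
      have : pre.length + (k + 1) + 1 = (pre ++ [p]).length + k + 1 := by simp; omega
      rw [this]
      rfl
    rw [hfun, ih (pre ++ [p]) st']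
    simp only [List.foldl_cons, hB]

-- ===== VERDICT (by name: the statement is the Claim_ definition above) =====
theorem add_path_spec : Claim_equal_add_path := by
  intro filesystem path _
  unfold Spec_add_path
  simp only [add_path, add_path_alt]
  set parts := PySem.Chars.splitOn (PySem.Chars.stripChars path.toList ['/']) ['/'] with hparts
  rw [PySem.List.pyRange_one, List.foldl_map]
  have h1 : (fun (st : Int × PySem.Set (List Char)) (k : Nat) => addPathStepA parts st (0 + (k : Int)))
      = (fun st k => stepT (([] : List (List Char)) ++ parts) st (([] : List (List Char)).length + k + 1)) := by
    funext st k
    rw [stepA_eq]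
    simp
  have h2 : ((parts.length : Int) - 0).toNat = parts.length := by omega
  rw [h2, h1, loop_eq parts [] (0, filesystem.map String.toList)]
  rfl
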